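-- pv_equiv track=rewrite | github.com/Aleshkev/algoritmika | codeforces-553/c--problem-for-nazar.py | sum_special
-- ===== SOURCE A (Python) =====
-- p = 10 ** 9 + 7
--
-- def sum_even(n):
--     return n * (n + 1) % p if n > 0 else 0
--
-- def sum_odd(n):
--     return (n + sum_even(n - 1)) % p if n > 0 else 0
--
-- def sum_special(n):
--     if n < 1:
--         return 0
--     d = 1
--     i = 0
--     s = [0, 0]
--     k = 0
--     while i < n:
--         s[k] += min(d, n - i)
--         k = (k + 1) % 2
--         i += d
--         d *= 2
--     return (sum_odd(s[0]) + sum_even(s[1])) % p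
-- ===== SOURCE B (Python) =====
-- p = 10 ** 9 + 7
--
-- def sum_special(n):
--     if n < 1:
--         return 0
--     m = (n + 1).bit_length() - 1        # number of complete groups: 2**m - 1 <= n < 2**(m+1) - 1
--     r = n - (2 ** m - 1)                # size of the truncated last group (group index m)
--     s0 = (4 ** ((m + 1) // 2) - 1) // 3     # sizes of groups 0,2,4,... (odd sequence)
--     s1 = 2 * (4 ** (m // 2) - 1) // 3       # sizes of groups 1,3,5,... (even sequence)
--     if m % 2 == 0:
--         s0 += r
--     else:
--         s1 += r
--     return (s0 * s0 + s1 * (s1 + 1)) % p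
-- ===== Notes on version B (the rewrite author's own statement) =====
-- stated objective: simpler
-- what changed: Replaced the doubling while-loop that accumulates group sizes one group at a time with a closed form: the number of complete groups comes from bit_length, the two alternating group-size sums come from the geometric-series formula for sums of powers of four, and the truncated remainder is added by the parity of the group count.
import Mathlib
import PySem

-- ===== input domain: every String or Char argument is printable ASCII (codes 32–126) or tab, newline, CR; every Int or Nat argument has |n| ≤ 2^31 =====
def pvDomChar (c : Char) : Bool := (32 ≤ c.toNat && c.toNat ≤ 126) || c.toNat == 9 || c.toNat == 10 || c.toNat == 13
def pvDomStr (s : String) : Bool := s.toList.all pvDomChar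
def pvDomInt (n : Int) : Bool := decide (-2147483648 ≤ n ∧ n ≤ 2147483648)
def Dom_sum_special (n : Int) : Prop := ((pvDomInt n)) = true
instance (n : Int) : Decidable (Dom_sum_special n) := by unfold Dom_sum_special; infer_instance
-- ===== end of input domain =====

-- B replaces A's doubling accumulation loop by a closed form (bit_length + geometric-series
-- sums of the alternating group sizes); objective: simpler (no loop).

-- ===== PORT A =====
def pA : Int := 10 ^ 9 + 7

def sum_even_A (n : Int) : Int := if n > 0 then PySem.Int.mod (n * (n + 1)) pA else 0

def sum_odd_A (n : Int) : Int := if n > 0 then PySem.Int.mod (n + sum_even_A (n - 1)) pA else 0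

-- A's while loop; the two cells of the list s are the accumulators s0, s1, selected by k.
-- fuel is a termination guard only: Python's loop terminates (d ≥ 1 and i grows by d),
-- and fuel = n.toNat + 1 strictly exceeds the number of iterations (about log2 n).
def loopA : Nat → Int → Int → Int → Int → Int → Int → Int × Int
  | 0, _, _, _, s0, s1, _ => (s0, s1)
  | fuel + 1, n, d, i, s0, s1, k =>
    if i < n then
      let add := min d (n - i)
      loopA fuel n (d * 2) (i + d)
        (if k = 0 then s0 + add else s0)
        (if k = 0 then s1 else s1 + add)
        (PySem.Int.mod (k + 1) 2)
    else (s0, s1)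

def sum_special (n : Int) : Int :=
  if n < 1 then 0
  else
    let s := loopA (n.toNat + 1) n 1 0 0 0 0
    PySem.Int.mod (sum_odd_A s.1 + sum_even_A s.2) pA

-- ===== PORT B =====
def pB : Int := 10 ^ 9 + 7

def sum_special_alt (n : Int) : Int :=
  if n < 1 then 0
  else
    -- m = (n+1).bit_length() - 1 : number of complete groups; 2^m - 1 ≤ n < 2^(m+1) - 1
    let m : Nat := PySem.Int.bitLength (n + 1) - 1
    let r : Int := n - (2 ^ m - 1)
    let s0 : Int := PySem.Int.floordiv ((4 : Int) ^ ((m + 1) / 2) - 1) 3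
    let s1 : Int := PySem.Int.floordiv (2 * ((4 : Int) ^ (m / 2) - 1)) 3
    let s0 := if m % 2 = 0 then s0 + r else s0
    let s1 := if m % 2 = 0 then s1 else s1 + r
    PySem.Int.mod (s0 * s0 + s1 * (s1 + 1)) pB

-- ===== PRECONDITION & SPEC =====
def Spec_sum_special (n : Int) (out : Int) : Prop := out = sum_special_alt n
instance (n : Int) (out : Int) : Decidable (Spec_sum_special n out) := by unfold Spec_sum_special; infer_instance

-- ===== CLAIM (what is proved, stated in full; the proofs are below) =====
def Claim_equal_sum_special : Prop := ∀ (n : Int), Dom_sum_special n → Spec_sum_special n (sum_special n)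

-- ===== LEMMAS AND PROOFS =====

-- contribution of the loop iterations starting at group index j, with t complete groups
-- (sizes 2^j, …, 2^(j+t-1)) followed by a truncated group of size r; first component
-- collects even group indices, second the odd ones.
def cfun : Nat → Nat → Int → Int × Int
  | j, 0, r => if j % 2 = 0 then (r, 0) else (0, r)
  | j, t + 1, r =>
    let c := cfun (j + 1) t r
    if j % 2 = 0 then (c.1 + 2 ^ j, c.2) else (c.1, c.2 + 2 ^ j)

lemma loopA_exit (fuel : Nat) (n d i s0 s1 k : Int) (h : ¬ i < n) :
    loopA fuel n d i s0 s1 k = (s0, s1) := by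
  cases fuel <;> simp [loopA, h]

lemma loop_spec : ∀ (t fuel j : Nat) (n s0 s1 : Int), t < fuel →
    (2 : Int) ^ (j + t) - 1 ≤ n → n < 2 ^ (j + t + 1) - 1 →
    loopA fuel n (2 ^ j) (2 ^ j - 1) s0 s1 ((j : Int) % 2)
      = (s0 + (cfun j t (n - (2 ^ (j + t) - 1))).1,
         s1 + (cfun j t (n - (2 ^ (j + t) - 1))).2) := by
  intro t
  induction t with
  | zero =>
    intro fuel j n s0 s1 hfuel hlo hhi
    obtain ⟨f, rfl⟩ : ∃ f, fuel = f + 1 := ⟨fuel - 1, by omega⟩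
    have hcast : ((j % 2 : Nat) : Int) = (j : Int) % 2 := by push_cast; ring
    simp only [Nat.add_zero] at hlo hhi ⊢
    have hps : (2 : Int) ^ (j + 1) = 2 ^ j * 2 := pow_succ 2 j
    by_cases hi : (2 : Int) ^ j - 1 < n
    · simp only [loopA]
      rw [if_pos hi, loopA_exit f n _ _ _ _ _ (by omega)]
      have hmin : min ((2 : Int) ^ j) (n - ((2 : Int) ^ j - 1)) = n - ((2 : Int) ^ j - 1) := by
        omega
      by_cases hj : j % 2 = 0
      · rw [if_pos (by omega : ((j : Int)) % 2 = 0), if_pos (by omega : ((j : Int)) % 2 = 0)]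
        simp only [cfun, if_pos hj, hmin, Prod.mk.injEq]
        simp
      · rw [if_neg (by omega : ¬ ((j : Int)) % 2 = 0), if_neg (by omega : ¬ ((j : Int)) % 2 = 0)]
        simp only [cfun, if_neg hj, hmin, Prod.mk.injEq]
        simp
    · rw [loopA_exit _ _ _ _ _ _ _ hi]
      have hr : n - ((2 : Int) ^ j - 1) = 0 := by omega
      rw [hr]
      by_cases hj : j % 2 = 0 <;> simp [cfun, hj]
  | succ t ih =>
    intro fuel j n s0 s1 hfuel hlo hhi
    obtain ⟨f, rfl⟩ : ∃ f, fuel = f + 1 := ⟨fuel - 1, by omega⟩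
    rw [show j + (t + 1) = j + t + 1 from by omega] at hlo hhi ⊢
    have hcast : ((j % 2 : Nat) : Int) = (j : Int) % 2 := by push_cast; ring
    have hp1 : (2 : Int) ^ (j + 1) = 2 ^ j * 2 := pow_succ 2 j
    have hp2 : (2 : Int) ^ (j + 1) ≤ 2 ^ (j + t + 1) :=
      pow_le_pow_right₀ (by norm_num) (by omega)
    have hi : (2 : Int) ^ j - 1 < n := by omega
    have hmin : min ((2 : Int) ^ j) (n - ((2 : Int) ^ j - 1)) = (2 : Int) ^ j := by omega
    have hk : PySem.Int.mod (((j : Int)) % 2 + 1) 2 = (((j + 1 : Nat) : Int)) % 2 := by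
      rw [PySem.Int.mod_eq_emod_of_pos (by norm_num)]; push_cast; omega
    simp only [loopA]
    rw [if_pos hi, hk,
      show (2 : Int) ^ j * 2 = 2 ^ (j + 1) from (pow_succ 2 j).symm,
      show (2 : Int) ^ j - 1 + 2 ^ j = 2 ^ (j + 1) - 1 from by rw [pow_succ]; ring]
    have IH := ih f (j + 1) n
      (if ((j : Int)) % 2 = 0 then s0 + min ((2 : Int) ^ j) (n - ((2 : Int) ^ j - 1)) else s0)
      (if ((j : Int)) % 2 = 0 then s1 else s1 + min ((2 : Int) ^ j) (n - ((2 : Int) ^ j - 1)))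
      (by omega) (by rw [show j + 1 + t = j + t + 1 from by omega]; exact hlo)
      (by rw [show j + 1 + t = j + t + 1 from by omega]; exact hhi)
    rw [show j + 1 + t = j + t + 1 from by omega] at IH
    rw [IH]
    by_cases hj : j % 2 = 0
    · rw [if_pos (by omega : ((j : Int)) % 2 = 0), if_pos (by omega : ((j : Int)) % 2 = 0)]
      simp only [cfun, if_pos hj, hmin, Prod.mk.injEq]
      exact ⟨by omega, trivial⟩
    · rw [if_neg (by omega : ¬ ((j : Int)) % 2 = 0), if_neg (by omega : ¬ ((j : Int)) % 2 = 0)]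
      simp only [cfun, if_neg hj, hmin, Prod.mk.injEq]
      exact ⟨trivial, by omega⟩

lemma cfun_closed : ∀ (t j : Nat) (r : Int),
    (j % 2 = 0 →
      3 * (cfun j t r).1 = 2 ^ j * ((4 : Int) ^ ((t + 1) / 2) - 1) + 3 * (if t % 2 = 0 then r else 0) ∧
      3 * (cfun j t r).2 = 2 ^ (j + 1) * ((4 : Int) ^ (t / 2) - 1) + 3 * (if t % 2 = 0 then 0 else r)) ∧
    (j % 2 = 1 →
      3 * (cfun j t r).1 = 2 ^ (j + 1) * ((4 : Int) ^ (t / 2) - 1) + 3 * (if t % 2 = 0 then 0 else r) ∧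
      3 * (cfun j t r).2 = 2 ^ j * ((4 : Int) ^ ((t + 1) / 2) - 1) + 3 * (if t % 2 = 0 then r else 0)) := by
  intro t
  induction t with
  | zero =>
    intro j r
    constructor
    · intro hj
      simp [cfun, hj]
    · intro hj
      have h0 : ¬ j % 2 = 0 := by omega
      simp [cfun, h0]
  | succ t ih =>
    intro j r
    have e2 : (t + 1 + 1) / 2 = t / 2 + 1 := by omega
    have hite1 : (if (t + 1) % 2 = 0 then r else (0 : Int)) = (if t % 2 = 0 then (0 : Int) else r) := by
      by_cases ht : t % 2 = 0
      · rw [if_neg (by omega), if_pos ht]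
      · rw [if_pos (by omega), if_neg ht]
    have hite2 : (if (t + 1) % 2 = 0 then (0 : Int) else r) = (if t % 2 = 0 then r else (0 : Int)) := by
      by_cases ht : t % 2 = 0
      · rw [if_neg (by omega), if_pos ht]
      · rw [if_pos (by omega), if_neg ht]
    constructor
    · intro hj
      obtain ⟨h1, h2⟩ := (ih (j + 1) r).2 (by omega)
      simp only [cfun, if_pos hj]
      refine ⟨?_, ?_⟩
      · rw [e2, hite1]
        linear_combination h1
      · rw [hite2]
        exact h2
    · intro hj
      obtain ⟨h1, h2⟩ := (ih (j + 1) r).1 (by omega)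
      simp only [cfun, if_neg (by omega : ¬ j % 2 = 0)]
      refine ⟨?_, ?_⟩
      · rw [hite2]
        exact h1
      · rw [e2, hite1]
        linear_combination h2

-- evaluations of A's helpers for nonnegative arguments
lemma sum_even_eval (S : Int) (h : 0 ≤ S) :
    sum_even_A S = (S * (S + 1)) % (10 ^ 9 + 7) := by
  have hP : (0 : Int) < 10 ^ 9 + 7 := by norm_num
  simp only [sum_even_A, pA, PySem.Int.mod_eq_emod_of_pos hP]
  by_cases c : S > 0
  · rw [if_pos c]
  · rw [if_neg c]
    have : S = 0 := by omega
    subst this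
    norm_num

lemma sum_odd_eval (S : Int) (h : 0 ≤ S) :
    sum_odd_A S = (S * S) % (10 ^ 9 + 7) := by
  have hP : (0 : Int) < 10 ^ 9 + 7 := by norm_num
  simp only [sum_odd_A, sum_even_A, pA, PySem.Int.mod_eq_emod_of_pos hP]
  by_cases c : S > 0
  · rw [if_pos c]
    by_cases c2 : S - 1 > 0
    · rw [if_pos c2]
      rw [show S * S = S + (S - 1) * (S - 1 + 1) from by ring]
      generalize (S - 1) * (S - 1 + 1) = x
      omega
    · rw [if_neg c2]
      have : S = 1 := by omega
      subst this
      norm_num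
  · rw [if_neg c]
    have : S = 0 := by omega
    subst this
    norm_num

-- the final modular wrap-ups agree: A's (sum_odd s0 + sum_even s1) % p = (s0² + s1(s1+1)) % p
lemma final_mod (S0 S1 : Int) (h0 : 0 ≤ S0) (h1 : 0 ≤ S1) :
    PySem.Int.mod (sum_odd_A S0 + sum_even_A S1) pA
      = PySem.Int.mod (S0 * S0 + S1 * (S1 + 1)) pB := by
  have hP : (0 : Int) < 10 ^ 9 + 7 := by norm_num
  rw [sum_odd_eval S0 h0, sum_even_eval S1 h1]
  simp only [pA, pB, PySem.Int.mod_eq_emod_of_pos hP]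
  generalize S0 * S0 = a
  generalize S1 * (S1 + 1) = b
  omega

-- nonnegativity of the loop contributions, from the closed form
lemma cfun_nonneg (m : Nat) (r : Int) (hr : 0 ≤ r) :
    0 ≤ (cfun 0 m r).1 ∧ 0 ≤ (cfun 0 m r).2 := by
  obtain ⟨h1, h2⟩ := (cfun_closed m 0 r).1 rfl
  have p1 : (0 : Int) < 4 ^ ((m + 1) / 2) := pow_pos (by norm_num) _
  have p2 : (0 : Int) < 4 ^ (m / 2) := pow_pos (by norm_num) _
  simp only [pow_zero, one_mul] at h1 h2
  by_cases hm2 : m % 2 = 0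
  · rw [if_pos hm2] at h1 h2; constructor <;> omega
  · rw [if_neg hm2] at h1 h2; constructor <;> omega

theorem sum_special_spec : Claim_equal_sum_special := by
  unfold Claim_equal_sum_special Spec_sum_special
  intro n _
  by_cases hn : n < 1
  · simp [sum_special, sum_special_alt, hn]
  · -- n ≥ 1: bit-length bounds for B's m
    have hub := PySem.Int.lt_two_pow_bitLength (n + 1)
    have hlb := PySem.Int.two_pow_bitLength_le (n + 1) (by omega)
    set L := PySem.Int.bitLength (n + 1) with hL
    have habs : (n + 1).natAbs = n.toNat + 1 := by omega
    have hL1 : 1 ≤ L := by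
      rcases Nat.eq_zero_or_pos L with h | h
      · rw [h] at hub; simp at hub; omega
      · exact h
    have hmL : L - 1 + 1 = L := by omega
    have hlo : (2 : Int) ^ (L - 1) - 1 ≤ n := by
      have : ((2 ^ (L - 1) : Nat) : Int) ≤ ((n + 1).natAbs : Int) := by exact_mod_cast hlb
      rw [Int.natAbs_of_nonneg (by omega)] at this
      push_cast at this
      omega
    have hhi : n < 2 ^ (L - 1 + 1) - 1 := by
      rw [hmL]
      have : (((n + 1).natAbs : Int)) < ((2 ^ L : Nat) : Int) := by exact_mod_cast hub
      rw [Int.natAbs_of_nonneg (by omega)] at this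
      push_cast at this
      omega
    have hfuel : L - 1 < n.toNat + 1 := by
      have h2 : L - 1 < 2 ^ (L - 1) := Nat.lt_two_pow_self
      omega
    have hspec := loop_spec (L - 1) (n.toNat + 1) 0 n 0 0 hfuel (by simpa using hlo) (by simpa using hhi)
    norm_num at hspec
    -- closed forms of the two accumulated sums
    have hr : 0 ≤ n - (2 ^ (L - 1) - 1) := by omega
    obtain ⟨hA1, hA2⟩ := (cfun_closed (L - 1) 0 (n - (2 ^ (L - 1) - 1))).1 rfl
    simp only [pow_zero, one_mul] at hA1 hA2
    obtain ⟨hnn1, hnn2⟩ := cfun_nonneg (L - 1) (n - (2 ^ (L - 1) - 1)) hr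
    -- unfold both programs
    simp only [sum_special, sum_special_alt, if_neg hn]
    rw [hspec]
    rw [show PySem.Int.bitLength (n + 1) - 1 = L - 1 from by rw [← hL]]
    rw [final_mod _ _ hnn1 hnn2]
    -- identify B's closed-form accumulators with the loop's
    by_cases hm2 : (L - 1) % 2 = 0
    · rw [if_pos hm2] at hA1 hA2 ⊢
      rw [if_pos hm2]
      have d1 : PySem.Int.floordiv ((4 : Int) ^ ((L - 1 + 1) / 2) - 1) 3
          = (cfun 0 (L - 1) (n - (2 ^ (L - 1) - 1))).1 - (n - (2 ^ (L - 1) - 1)) := by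
        rw [show (4 : Int) ^ ((L - 1 + 1) / 2) - 1
              = 3 * ((cfun 0 (L - 1) (n - (2 ^ (L - 1) - 1))).1 - (n - (2 ^ (L - 1) - 1))) from by omega]
        rw [PySem.Int.floordiv_eq_ediv_of_pos (by norm_num)]
        exact Int.mul_ediv_cancel_left _ (by norm_num)
      have d2 : PySem.Int.floordiv (2 * ((4 : Int) ^ ((L - 1) / 2) - 1)) 3
          = (cfun 0 (L - 1) (n - (2 ^ (L - 1) - 1))).2 := by
        rw [show 2 * ((4 : Int) ^ ((L - 1) / 2) - 1)
              = 3 * (cfun 0 (L - 1) (n - (2 ^ (L - 1) - 1))).2 from by omega]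
        rw [PySem.Int.floordiv_eq_ediv_of_pos (by norm_num)]
        exact Int.mul_ediv_cancel_left _ (by norm_num)
      rw [d1, d2]
      ring_nf
    · rw [if_neg hm2] at hA1 hA2 ⊢
      rw [if_neg hm2]
      have d1 : PySem.Int.floordiv ((4 : Int) ^ ((L - 1 + 1) / 2) - 1) 3
          = (cfun 0 (L - 1) (n - (2 ^ (L - 1) - 1))).1 := by
        rw [show (4 : Int) ^ ((L - 1 + 1) / 2) - 1
              = 3 * (cfun 0 (L - 1) (n - (2 ^ (L - 1) - 1))).1 from by omega]
        rw [PySem.Int.floordiv_eq_ediv_of_pos (by norm_num)]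
        exact Int.mul_ediv_cancel_left _ (by norm_num)
      have d2 : PySem.Int.floordiv (2 * ((4 : Int) ^ ((L - 1) / 2) - 1)) 3
          = (cfun 0 (L - 1) (n - (2 ^ (L - 1) - 1))).2 - (n - (2 ^ (L - 1) - 1)) := by
        rw [show 2 * ((4 : Int) ^ ((L - 1) / 2) - 1)
              = 3 * ((cfun 0 (L - 1) (n - (2 ^ (L - 1) - 1))).2 - (n - (2 ^ (L - 1) - 1))) from by omega]
        rw [PySem.Int.floordiv_eq_ediv_of_pos (by norm_num)]
        exact Int.mul_ediv_cancel_left _ (by norm_num)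
      rw [d1, d2]
      ring_nf
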